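-- pv_equiv track=rewrite | github.com/musco-ai/musco-tf | musco/tf/compressor/decompositions/constructor.py | del_redundant_keys
-- ===== SOURCE A (Python) =====
-- def del_redundant_keys(dict_1, dict_2):
--     del_keys = []
--
--     for key in dict_1:
--         if key not in dict_2:
--             continue
--         del_keys.append(key)
--
--     for key in del_keys:
--         del dict_1[key]
--
--     return dict_1
-- ===== SOURCE B (Python) =====
-- # B: single-pass dict comprehension keeping only keys absent from dict_2.
-- # Unlike A it does not mutate dict_1 in place; the RETURN value is identical.
-- def del_redundant_keys(dict_1, dict_2):
--     return {key: value for key, value in dict_1.items() if key not in dict_2}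
-- ===== Notes on version B (the rewrite author's own statement) =====
-- stated objective: idiomatic
-- what changed: Replaces A's two-pass collect-keys-then-delete mutation with a single-pass dict comprehension that builds the result directly (no accumulator list, no delete loop; B does not mutate dict_1, only the return value is claimed equal).
import Mathlib
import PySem

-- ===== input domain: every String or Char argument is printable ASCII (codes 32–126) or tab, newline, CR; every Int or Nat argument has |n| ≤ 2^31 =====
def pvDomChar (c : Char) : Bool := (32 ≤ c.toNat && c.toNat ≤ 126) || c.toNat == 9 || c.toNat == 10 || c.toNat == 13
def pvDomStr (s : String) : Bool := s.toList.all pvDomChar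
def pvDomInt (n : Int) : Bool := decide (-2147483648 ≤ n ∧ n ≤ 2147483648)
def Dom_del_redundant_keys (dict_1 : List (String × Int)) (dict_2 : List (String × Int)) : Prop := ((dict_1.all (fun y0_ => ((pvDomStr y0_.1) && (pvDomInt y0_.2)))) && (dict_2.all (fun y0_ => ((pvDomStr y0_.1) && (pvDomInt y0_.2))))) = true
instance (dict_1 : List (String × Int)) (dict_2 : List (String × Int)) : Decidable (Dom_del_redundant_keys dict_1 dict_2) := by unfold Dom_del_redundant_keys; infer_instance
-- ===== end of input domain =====

-- B replaces A's collect-then-delete two-pass mutation with a single-pass filter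
-- (dict comprehension); A mutates dict_1 in place, B does not — only the RETURN
-- value is claimed equal.

-- ===== PORT A =====
-- `del dict_1[key]`: remove the first (unique, for a Python dict) pair with that key.
def pvEraseKey : List (String × Int) → String → List (String × Int)
  | [], _ => []
  | x :: t, k => if x.1 == k then t else x :: pvEraseKey t k

def del_redundant_keys (dict_1 : List (String × Int)) (dict_2 : List (String × Int)) : List (String × Int) :=
  let del_keys : List String :=
    dict_1.foldl (fun acc kv =>
      if (dict_2.any (fun q => q.1 == kv.1)) = false then acc  -- `continue`
      else acc ++ [kv.1]) []
  del_keys.foldl (fun d k => pvEraseKey d k) dict_1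

-- ===== PORT B =====
def del_redundant_keys_alt (dict_1 : List (String × Int)) (dict_2 : List (String × Int)) : List (String × Int) :=
  dict_1.filter (fun kv => !(dict_2.any (fun q => q.1 == kv.1)))

-- ===== PRECONDITION & SPEC =====
def Spec_del_redundant_keys (dict_1 : List (String × Int)) (dict_2 : List (String × Int)) (out : List (String × Int)) : Prop := out = del_redundant_keys_alt dict_1 dict_2
instance (dict_1 : List (String × Int)) (dict_2 : List (String × Int)) (out : List (String × Int)) : Decidable (Spec_del_redundant_keys dict_1 dict_2 out) := by unfold Spec_del_redundant_keys; infer_instance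

-- ===== CLAIM (what is proved, stated in full; the proofs are below) =====
def Claim_equal_del_redundant_keys : Prop := ∀ (dict_1 : List (String × Int)) (dict_2 : List (String × Int)), Dom_del_redundant_keys dict_1 dict_2 → Spec_del_redundant_keys dict_1 dict_2 (del_redundant_keys dict_1 dict_2)

-- ===== LEMMAS AND PROOFS =====

-- The collecting loop appends exactly the keys of the pairs whose key occurs in dict_2.
theorem pv_delkeys_foldl (dict_2 : List (String × Int)) :
    ∀ (l : List (String × Int)) (acc : List String),
      l.foldl (fun acc kv =>
        if (dict_2.any (fun q => q.1 == kv.1)) = false then acc else acc ++ [kv.1]) acc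
      = acc ++ ((l.filter (fun kv => dict_2.any (fun q => q.1 == kv.1))).map Prod.fst) := by
  intro l
  induction l with
  | nil => intro acc; simp
  | cons x t ih =>
      intro acc
      by_cases h : (dict_2.any (fun q => q.1 == x.1)) = true
      · simp [List.foldl_cons, h, ih]
      · simp at h
        simp [List.foldl_cons, h, ih]

-- Erasing keys none of which equals x.1 leaves the head pair in place.
theorem pv_foldl_erase_ne (x : String × Int) :
    ∀ (ks : List String) (t : List (String × Int)),
      (∀ k ∈ ks, (x.1 == k) = false) →
      ks.foldl (fun d k => pvEraseKey d k) (x :: t)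
        = x :: ks.foldl (fun d k => pvEraseKey d k) t := by
  intro ks
  induction ks with
  | nil => intro t _; rfl
  | cons k ks ih =>
      intro t h
      have hk : (x.1 == k) = false := h k (List.mem_cons_self ..)
      have hstep : pvEraseKey (x :: t) k = x :: pvEraseKey t k := by
        simp [pvEraseKey, hk]
      simp only [List.foldl_cons, hstep]
      exact ih _ (fun k' hk' => h k' (List.mem_cons_of_mem _ hk'))

-- Core: erasing, from l, the keys of the pairs of l present in dict_2 yields the filter.
theorem pv_erase_filter (dict_2 : List (String × Int)) :
    ∀ (l : List (String × Int)),
      ((l.filter (fun kv => dict_2.any (fun q => q.1 == kv.1))).map Prod.fst).foldl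
        (fun d k => pvEraseKey d k) l
      = l.filter (fun kv => !(dict_2.any (fun q => q.1 == kv.1))) := by
  intro l
  induction l with
  | nil => rfl
  | cons x t ih =>
      by_cases h : (dict_2.any (fun q => q.1 == x.1)) = true
      · -- x is deleted: its key heads del_keys and erases x itself first.
        have hfil : (x :: t).filter (fun kv => dict_2.any (fun q => q.1 == kv.1))
            = x :: t.filter (fun kv => dict_2.any (fun q => q.1 == kv.1)) := by
          simp [h]
        have hx : pvEraseKey (x :: t) x.1 = t := by simp [pvEraseKey]
        rw [hfil]
        simp only [List.map_cons, List.foldl_cons]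
        rw [hx, ih]
        simp [h]
      · -- x survives: every collected key is in dict_2, hence differs from x.1.
        simp only [Bool.not_eq_true] at h
        have hne : ∀ k ∈ (t.filter (fun kv => dict_2.any (fun q => q.1 == kv.1))).map Prod.fst,
            (x.1 == k) = false := by
          intro k hk
          simp only [List.mem_map, List.mem_filter] at hk
          obtain ⟨kv, ⟨_, hmem⟩, rfl⟩ := hk
          by_contra hcontra
          simp only [Bool.not_eq_false, beq_iff_eq] at hcontra
          rw [hcontra] at h
          rw [h] at hmem
          exact Bool.false_ne_true hmem
        have hfil : (x :: t).filter (fun kv => dict_2.any (fun q => q.1 == kv.1))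
            = t.filter (fun kv => dict_2.any (fun q => q.1 == kv.1)) := by
          simp [h]
        rw [hfil, pv_foldl_erase_ne x _ t hne, ih]
        simp [h]

-- ===== VERDICT (by name: the statement is the Claim_ definition above) =====
theorem del_redundant_keys_spec : Claim_equal_del_redundant_keys := by
  intro d1 d2 _
  unfold Spec_del_redundant_keys del_redundant_keys del_redundant_keys_alt
  rw [pv_delkeys_foldl d2 d1 []]
  simpa using pv_erase_filter d2 d1
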